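/-
  THE MAIN LOOP OF jsmn_parse OVER THE RENDERING OF A VALUE  (token mode; by induction on the layout).

  value_reaches    at the first byte of (a rendering of) a value, `toknext = k`, superior token `sup`: the loop comes to the byte behind it,
                   with the value's `count` tokens stored from `k` on — exactly `Layout.tokens` — and `sup`'s size raised by one
  items_reaches    the same for the elements of an array (`toksuper` = the array, before and after)
  members_reaches  the same for the members of an object (`toksuper` = the object before; after the last member it is the last KEY
                   or the object, depending on the configuration and on the last value: the closing `}` does not care)

  WHERE THE CONFIGURATIONS DIFFER (`supAfter`): after an object or array the superior token is, with JSMN_PARENT_LINKS, the parent of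
  the closed token (for a member's value: the KEY; the next `,` steps up once more); without, the nearest token below that is still
  open (for a member's value: the OBJECT itself; the next `,` finds nothing to do). After a string or primitive it is unchanged in both.
-/
import Json.Jsmn.CorrectTokens

namespace Jsmn
open Json

/-- `toksuper` behind a value that started with superior token `sup` and `k` tokens allocated. -/
def supAfter (cfg : Config) (l : Layout) (ts : Tokens) (k : Nat) (sup : Int) : Int :=
  if l.isContainer && !cfg.parentLinks then openBelow ts k else sup

theorem primStop_comma (cfg : Config) : primStop cfg 0x2c = true := by simp [primStop]
theorem primStop_rbracket (cfg : Config) : primStop cfg 0x5d = true := by simp [primStop]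
theorem primStop_rbrace (cfg : Config) : primStop cfg 0x7d = true := by simp [primStop]

/-- Behind an element or a member's value stands whitespace, a comma, or the closing bracket: a stop character. -/
theorem stopAfter_post (cfg : Config) {post : List UInt8} (hpost : IsWs post) {c : UInt8} (hc : primStop cfg c = true) (r : List UInt8) :
    StopAfter cfg (post ++ c :: r) := by
  cases post with
  | nil => exact Or.inr ⟨c, r, rfl, hc⟩
  | cons w post => exact Or.inr ⟨w, post ++ c :: r, rfl, isWsChar_stop cfg (hpost w (by simp))⟩

section
variable {cfg : Config} {js : List UInt8} {n : Nat}

/-- A number or literal as a value. -/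
theorem prim_value (hjs : js.length < 2147483648) (hn : n ≤ 2147483648) {t : List UInt8} (ht : IsPrimText t) {pos k : Nat} {sup : Int}
    {ts : Tokens} {rest : List UInt8} (hd : js.drop pos = t ++ rest) (hstop : StopAfter cfg rest) (hlen : ts.length = n) (hk : k + 1 ≤ n)
    (hkp : k ≤ pos) (hsup : SupOk ts k sup pos) (hty : SupType ts sup) :
    ∃ ts', Placed cfg ts ts' sup 1 k [⟨JSMN_PRIMITIVE, pos, (pos + t.length : Nat), 0, sup⟩] ∧
      Reaches cfg js n ⟨⟨pos, k, sup⟩, some ts, k⟩ ⟨⟨pos + t.length, k + 1, sup⟩, some ts', (k + 1 : Nat)⟩ := by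
  obtain ⟨c0, t', rfl, hc0, hall⟩ := ht
  have hlt : pos < js.length := lt_of_drop (show js.drop pos = c0 :: (t' ++ rest) by simpa using hd)
  exact ⟨_, placed_scalar cfg _ (by omega) hsup (by omega),
    (prim_trip hjs hc0 hall hd hstop hlen (by omega) hn (by omega) (by omega) hty).cast (St.ext' rfl rfl rfl rfl (by omega))⟩

/-- A string as a value (or as a key: no condition on the type of the superior token). -/
theorem string_value (hjs : js.length < 2147483648) (hn : n ≤ 2147483648) {b : List UInt8} (hb : IsStringBody b) {pos k : Nat} {sup : Int}
    {ts : Tokens} {rest : List UInt8} (hd : js.drop pos = 0x22 :: b ++ 0x22 :: rest) (hlen : ts.length = n) (hk : k + 1 ≤ n)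
    (hkp : k ≤ pos) (hsup : SupOk ts k sup pos) :
    ∃ ts', Placed cfg ts ts' sup 1 k [⟨JSMN_STRING, (pos + 1 : Nat), (pos + 1 + b.length : Nat), 0, sup⟩] ∧
      Reaches cfg js n ⟨⟨pos, k, sup⟩, some ts, k⟩ ⟨⟨pos + (1 + b.length + 1), k + 1, sup⟩, some ts', (k + 1 : Nat)⟩ := by
  have hlt : pos < js.length := lt_of_drop (show js.drop pos = 0x22 :: (b ++ 0x22 :: rest) by simpa using hd)
  exact ⟨_, placed_scalar cfg _ (by omega) hsup (by omega),
    (string_trip hjs hb hd hlen (by omega) hn (by omega) (by omega)).cast (St.ext' rfl rfl rfl rfl (by omega))⟩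

set_option linter.unusedSectionVars false
variable (hjs : js.length < 2147483648) (hn : n ≤ 2147483648)
include hjs hn

mutual
/-- **The loop over a value.** -/
theorem value_reaches : (l : Layout) → l.WellFormed → ∀ (pos k : Nat) (sup : Int) (ts : Tokens) (rest : List UInt8),
    js.drop pos = l.text ++ rest → (l.isPrimitive = true → StopAfter cfg rest) → ts.length = n → k + l.count ≤ n → k ≤ pos →
    SupOk ts k sup pos → SupType ts sup →
    ∃ ts', Placed cfg ts ts' sup 1 k (l.tokens pos k sup) ∧
      Reaches cfg js n ⟨⟨pos, k, sup⟩, some ts, k⟩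
        ⟨⟨pos + l.text.length, k + l.count, supAfter cfg l ts k sup⟩, some ts', (k + l.count : Nat)⟩
  | .null, _ => fun pos k sup ts rest hd hstop hlen hk hkp hsup hty =>
    prim_value hjs hn isPrimText_null hd (hstop rfl) hlen hk hkp hsup hty
  | .true, _ => fun pos k sup ts rest hd hstop hlen hk hkp hsup hty =>
    prim_value hjs hn isPrimText_true hd (hstop rfl) hlen hk hkp hsup hty
  | .false, _ => fun pos k sup ts rest hd hstop hlen hk hkp hsup hty =>
    prim_value hjs hn isPrimText_false hd (hstop rfl) hlen hk hkp hsup hty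
  | .number t, wf => fun pos k sup ts rest hd hstop hlen hk hkp hsup hty =>
    prim_value hjs hn (IsNumber.isPrimText wf) hd (hstop rfl) hlen hk hkp hsup hty
  | .string b, wf => fun pos k sup ts rest hd _ hlen hk hkp hsup _ => by
    obtain ⟨ts', P, T⟩ := string_value (cfg := cfg) hjs hn wf (show js.drop pos = 0x22 :: b ++ 0x22 :: rest by simpa [Layout.text] using hd)
      hlen hk hkp hsup
    exact ⟨ts', by rw [Layout.tokens]; exact P, T.cast (St.ext' (by simp [Layout.text]; omega) rfl rfl rfl rfl)⟩
  | .array ws items, wf => fun pos k sup ts rest hd _ hlen hk hkp hsup hty => by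
    obtain ⟨hws, hitems⟩ := wf
    have hcount : (Layout.array ws items).count = 1 + items.count := rfl
    have hd0 : js.drop pos = 0x5b :: (ws ++ (items.text ++ 0x5d :: rest)) := by simpa [Layout.text] using hd
    have hlt := lt_of_drop hd0
    have hsupk : ∀ a : Nat, sup = a → a < k := by
      intro a ha; rcases hsup with h | ⟨a', h, h', _⟩ <;> omega
    -- `[`
    have T1 := open_trip (cfg := cfg) (n := n) (cnt := k) hjs (Or.inr rfl) hd0 hlen (by omega) hn (by omega) (by omega) hsup hty
    have P1 := placed_scalar cfg (⟨openType 0x5b, pos, -1, 0, sup⟩) (by omega : k < ts.length) hsup (by omega : pos < 2147483647)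
    generalize bump (ts.set k (stampTok cfg ⟨openType 0x5b, pos, -1, 0, sup⟩ (ts.getD k default))) sup = tsb at T1 P1
    have hbk : tsb.getD k default = stampTok cfg ⟨openType 0x5b, pos, -1, 0, sup⟩ (ts.getD k default) := by
      simpa using P1.new_eq 0 (by simp)
    -- whitespace
    have hd1 := drop_succ hd0
    have T2 := skip_ws (cfg := cfg) (n := n) (by omega) (k + 1) k (some tsb) ((k : Int) + 1) ws (pos + 1) _ hws hd1
    have hd2 := drop_advance hd1
    -- the elements
    have hin : Inside cfg tsb k (k + 1) := ⟨by omega, by rw [hbk, stampTok_isOpen]; rfl, fun i h1 h2 => by omega, fun _ i h1 h2 => by omega⟩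
    obtain ⟨tsc, P2, T3⟩ := items_reaches items hitems (pos + 1 + ws.length) (k + 1) k tsb rest hd2 (P1.len.trans hlen) (by omega) (by omega)
      hin (by rw [hbk, stampTok_type]; rfl) (by rw [hbk, stampTok_size]; simp) (by rw [hbk, stampTok_size]; simp; omega)
    -- `]`
    have hin2 := hin.extend P2 (Items.tokens_closed items _ _ _) (Items.tokens_parents items _ _ _)
    rw [Items.tokens_length] at hin2
    have hd3 := drop_advance hd2
    have hck : tsc.getD k default = { tsb.getD k default with size := (tsb.getD k default).size + items.length } := P2.sup_eq k rfl
    have T4 := close_trip (cfg := cfg) (n := n) (sup := k) (cnt := ((k + 1 + items.count : Nat) : Int)) hjs (Or.inr rfl) hd3 hin2.lt (by omega)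
      hin2.isOpen (by rw [hck]; simp only [hbk, stampTok_type]; rfl) hin2.closed hin2.parents
    have hlen' : (Layout.array ws items).text.length = 1 + ws.length + items.text.length + 1 := by simp [Layout.text]; omega
    have P := Placed.container (e := ((pos + 1 + ws.length + items.text.length + 1 : Nat) : Int)) P1 P2 hsupk (by omega)
    refine ⟨_, P.cast rfl ?_, ?_⟩
    · simp only [Layout.tokens, openType]
      congr 2; omega
    · refine ((T1.trans (T2.cast (St.ext' rfl rfl rfl rfl (by omega)))).trans (T3.trans T4)).cast (St.ext' (by omega) (by omega) ?_ rfl (by omega))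
      simp only [supAfter, Layout.isContainer, Bool.true_and]
      cases hl : cfg.parentLinks
      · simp only [Bool.false_eq_true, if_false, Bool.not_false, if_true, openBelow]
        rw [scanOpen_congr (ts := ts) (ts' := tsc) k (fun i hi => ?_)]
        rw [P2.other i (by omega) (Or.inl (by omega))]
        by_cases his : (i : Int) = sup
        · rw [P1.sup_eq i his.symm]; rfl
        · rw [P1.other i his (Or.inl hi)]
      · simp only [if_true, Bool.not_true, Bool.false_eq_true, if_false, hck, hbk, stampTok_parent_links hl]
  | .object ws members, wf => fun pos k sup ts rest hd _ hlen hk hkp hsup hty => by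
    obtain ⟨hws, hmembers⟩ := wf
    have hcount : (Layout.object ws members).count = 1 + members.count := rfl
    have hd0 : js.drop pos = 0x7b :: (ws ++ (members.text ++ 0x7d :: rest)) := by simpa [Layout.text] using hd
    have hlt := lt_of_drop hd0
    have hsupk : ∀ a : Nat, sup = a → a < k := by
      intro a ha; rcases hsup with h | ⟨a', h, h', _⟩ <;> omega
    -- `{`
    have T1 := open_trip (cfg := cfg) (n := n) (cnt := k) hjs (Or.inl rfl) hd0 hlen (by omega) hn (by omega) (by omega) hsup hty
    have P1 := placed_scalar cfg (⟨openType 0x7b, pos, -1, 0, sup⟩) (by omega : k < ts.length) hsup (by omega : pos < 2147483647)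
    generalize bump (ts.set k (stampTok cfg ⟨openType 0x7b, pos, -1, 0, sup⟩ (ts.getD k default))) sup = tsb at T1 P1
    have hbk : tsb.getD k default = stampTok cfg ⟨openType 0x7b, pos, -1, 0, sup⟩ (ts.getD k default) := by
      simpa using P1.new_eq 0 (by simp)
    -- whitespace
    have hd1 := drop_succ hd0
    have T2 := skip_ws (cfg := cfg) (n := n) (by omega) (k + 1) k (some tsb) ((k : Int) + 1) ws (pos + 1) _ hws hd1
    have hd2 := drop_advance hd1
    -- the members
    have hin : Inside cfg tsb k (k + 1) := ⟨by omega, by rw [hbk, stampTok_isOpen]; rfl, fun i h1 h2 => by omega, fun _ i h1 h2 => by omega⟩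
    obtain ⟨tsc, sup', P2, T3⟩ := members_reaches members hmembers (pos + 1 + ws.length) (k + 1) k tsb rest hd2 (P1.len.trans hlen) (by omega)
      (by omega) hin (by rw [hbk, stampTok_type]; rfl) (by rw [hbk, stampTok_size]; simp) (by rw [hbk, stampTok_size]; simp; omega)
    -- `}`
    have hin2 := hin.extend P2 (Members.tokens_closed members _ _ _) (Members.tokens_parents members _ _ _)
    rw [Members.tokens_length] at hin2
    have hd3 := drop_advance hd2
    have hck : tsc.getD k default = { tsb.getD k default with size := (tsb.getD k default).size + members.length } := P2.sup_eq k rfl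
    have T4 := close_trip (cfg := cfg) (n := n) (sup := sup') (cnt := ((k + 1 + members.count : Nat) : Int)) hjs (Or.inl rfl) hd3 hin2.lt
      (by omega) hin2.isOpen (by rw [hck]; simp only [hbk, stampTok_type]; rfl) hin2.closed hin2.parents
    have hlen' : (Layout.object ws members).text.length = 1 + ws.length + members.text.length + 1 := by simp [Layout.text]; omega
    have P := Placed.container (e := ((pos + 1 + ws.length + members.text.length + 1 : Nat) : Int)) P1 P2 hsupk (by omega)
    refine ⟨_, P.cast rfl ?_, ?_⟩
    · simp only [Layout.tokens, openType]
      congr 2; omega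
    · refine ((T1.trans (T2.cast (St.ext' rfl rfl rfl rfl (by omega)))).trans (T3.trans T4)).cast (St.ext' (by omega) (by omega) ?_ rfl (by omega))
      simp only [supAfter, Layout.isContainer, Bool.true_and]
      cases hl : cfg.parentLinks
      · simp only [Bool.false_eq_true, if_false, Bool.not_false, if_true, openBelow]
        rw [scanOpen_congr (ts := ts) (ts' := tsc) k (fun i hi => ?_)]
        rw [P2.other i (by omega) (Or.inl (by omega))]
        by_cases his : (i : Int) = sup
        · rw [P1.sup_eq i his.symm]; rfl
        · rw [P1.other i his (Or.inl hi)]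
      · simp only [if_true, Bool.not_true, Bool.false_eq_true, if_false, hck, hbk, stampTok_parent_links hl]

/-- **The loop over the elements of the array with token `a`.** -/
theorem items_reaches : (is : Items) → is.WellFormed → ∀ (pos k a : Nat) (ts : Tokens) (rest : List UInt8),
    js.drop pos = is.text ++ 0x5d :: rest → ts.length = n → k + is.count ≤ n → k ≤ pos → Inside cfg ts a k →
    (ts.getD a default).type = JSMN_ARRAY → 0 ≤ (ts.getD a default).size → (ts.getD a default).size ≤ pos →
    ∃ ts', Placed cfg ts ts' a is.length k (is.tokens pos k a) ∧
      Reaches cfg js n ⟨⟨pos, k, a⟩, some ts, k⟩ ⟨⟨pos + is.text.length, k + is.count, a⟩, some ts', (k + is.count : Nat)⟩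
  | .nil, _ => fun pos k a ts rest _ _ _ _ _ _ _ _ => ⟨ts, Placed.nil cfg ts a k, Reaches.refl _ _ _ _⟩
  | .cons pre item post tail, wf => fun pos k a ts rest hd hlen hk hkp hin hty hs0 hs1 => by
    obtain ⟨hpre, hitem, hpost, htail⟩ := wf
    have IH := items_reaches tail htail
    have hcount : (Items.cons pre item post tail).count = item.count + tail.count := rfl
    have hd0 : js.drop pos = pre ++ (item.text ++ (post ++ (tail.tail ++ 0x5d :: rest))) := by simpa [Items.text] using hd
    -- whitespace, the element, whitespace
    have T1 := skip_ws (cfg := cfg) (n := n) (by omega) k a (some ts) k pre pos _ hpre hd0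
    have hd1 := drop_advance hd0
    have hstop : StopAfter cfg (post ++ (tail.tail ++ 0x5d :: rest)) := by
      cases tail with
      | nil => exact stopAfter_post cfg hpost (primStop_rbracket cfg) rest
      | cons pre2 item2 post2 tail2 => exact stopAfter_post cfg hpost (primStop_comma cfg) _
    obtain ⟨ts1, P1, T2⟩ := value_reaches item hitem (pos + pre.length) k a ts _ hd1 (fun _ => hstop) hlen (by omega) (by omega)
      (Or.inr ⟨a, rfl, hin.lt, hs0, by omega⟩) (Or.inr ⟨a, rfl, Or.inl hty⟩)
    have hsa : supAfter cfg item ts k a = a := by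
      unfold supAfter; split
      · simp only [openBelow, scanOpen_eq_some hin.isOpen k hin.lt hin.closed]
      · rfl
    rw [hsa] at T2
    have hin1 := hin.extend P1 (Layout.tokens_closed item _ _ _) (Layout.tokens_parents item _ _ _)
    rw [Layout.tokens_length] at hin1
    have hd2 := drop_advance hd1
    have T3 := skip_ws (cfg := cfg) (n := n) (by omega) (k + item.count) a (some ts1) ((k + item.count : Nat) : Int) post
      (pos + pre.length + item.text.length) _ hpost hd2
    have hd3 := drop_advance hd2
    have h1a : ts1.getD a default = { ts.getD a default with size := (ts.getD a default).size + 1 } := P1.sup_eq a rfl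
    cases tail with
    | nil =>
      refine ⟨ts1, (P1.append (Placed.nil cfg ts1 a _) (fun a' h => by have := hin.lt; omega)).cast ?_ ?_, ?_⟩
      · simp [Items.length]
      · simp [Items.tokens]
      · exact ((T1.trans T2).trans T3).cast (St.ext' (by simp [Items.text, Items.tail]; omega) (by simp [Items.count]) rfl rfl
          (by simp [Items.count]))
    | cons pre2 item2 post2 tail2 =>
      have hd3' : js.drop (pos + pre.length + item.text.length + post.length) =
          0x2c :: ((Items.cons pre2 item2 post2 tail2).text ++ 0x5d :: rest) := by simpa [Items.tail, Items.text] using hd3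
      have hlt3 := lt_of_drop hd3'
      have T4 := comma_trip_container (cfg := cfg) (n := n) (k := k + item.count) (cnt := ((k + item.count : Nat) : Int)) hjs hd3'
        (show (ts1.getD a default).type = JSMN_ARRAY ∨ _ from Or.inl (by rw [h1a]; exact hty))
      have hic := Layout.count_le_text item hitem
      obtain ⟨ts2, P2, T5⟩ := IH (pos + pre.length + item.text.length + post.length + 1) (k + item.count) a ts1 rest (drop_succ hd3')
        (P1.len.trans hlen) (by omega) (by omega) hin1 (by rw [h1a]; exact hty) (by rw [h1a]; simp only; omega) (by rw [h1a]; simp only; omega)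
      refine ⟨ts2, (P1.append (by rw [Layout.tokens_length]; exact P2) (fun a' h => by have := hin.lt; omega)).cast ?_ ?_, ?_⟩
      · simp [Items.length]
      · simp [Items.tokens]
      · exact ((((T1.trans T2).trans T3).trans T4).trans T5).cast (St.ext' (by simp [Items.text, Items.tail]; omega)
          (by simp [Items.count]; omega) rfl rfl (by simp [Items.count]; omega))

/-- **The loop over the members of the object with token `o`.** -/
theorem members_reaches : (ms : Members) → ms.WellFormed → ∀ (pos k o : Nat) (ts : Tokens) (rest : List UInt8),
    js.drop pos = ms.text ++ 0x7d :: rest → ts.length = n → k + ms.count ≤ n → k ≤ pos → Inside cfg ts o k →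
    (ts.getD o default).type = JSMN_OBJECT → 0 ≤ (ts.getD o default).size → (ts.getD o default).size ≤ pos →
    ∃ ts' sup', Placed cfg ts ts' o ms.length k (ms.tokens pos k o) ∧
      Reaches cfg js n ⟨⟨pos, k, o⟩, some ts, k⟩ ⟨⟨pos + ms.text.length, k + ms.count, sup'⟩, some ts', (k + ms.count : Nat)⟩
  | .nil, _ => fun pos k o ts rest _ _ _ _ _ _ _ _ => ⟨ts, o, Placed.nil cfg ts o k, Reaches.refl _ _ _ _⟩
  | .cons pre key mid pre' val post tail, wf => fun pos k o ts rest hd hlen hk hkp hin hty hs0 hs1 => by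
    obtain ⟨hpre, hkey, hmid, hpre', hval, hpost, htail⟩ := wf
    have IH := members_reaches tail htail
    have hcount : (Members.cons pre key mid pre' val post tail).count = 1 + val.count + tail.count := rfl
    have hd0 : js.drop pos = pre ++ (0x22 :: (key ++ 0x22 :: (mid ++ 0x3a :: (pre' ++ (val.text ++ (post ++ (tail.tail ++ 0x7d :: rest))))))) := by
      simpa [Members.text] using hd
    have hok := hin.lt
    -- whitespace, the key
    have T1 := skip_ws (cfg := cfg) (n := n) (by omega) k o (some ts) k pre pos _ hpre hd0
    have hd1 := drop_advance hd0
    have hlt1 := lt_of_drop hd1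
    obtain ⟨ts1, P1, T2⟩ := string_value (cfg := cfg) hjs hn hkey (show js.drop (pos + pre.length) = 0x22 :: key ++ 0x22 :: _ from hd1) hlen
      (by omega) (by omega) (Or.inr ⟨o, rfl, hok, hs0, by omega⟩)
    have h1k : ts1.getD k default = stampTok cfg ⟨JSMN_STRING, (pos + pre.length + 1 : Nat), (pos + pre.length + 1 + key.length : Nat), 0, o⟩
        (ts.getD k default) := by simpa using P1.new_eq 0 (by simp)
    rw [show pos + pre.length + (1 + key.length + 1) = pos + pre.length + 1 + key.length + 1 by omega] at T2
    have hd2 : js.drop (pos + pre.length + 1 + key.length + 1) = mid ++ 0x3a :: (pre' ++ (val.text ++ (post ++ (tail.tail ++ 0x7d :: rest)))) :=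
      drop_succ (drop_advance (drop_succ hd1))
    -- whitespace, `:`, whitespace
    have T3 := skip_ws (cfg := cfg) (n := n) (by omega) (k + 1) o (some ts1) ((k + 1 : Nat) : Int) mid _ _ hmid hd2
    have hd3 := drop_advance hd2
    have hlt3 := lt_of_drop hd3
    have T4 := colon_trip (cfg := cfg) (n := n) (sup := o) (toks := some ts1) (cnt := ((k + 1 : Nat) : Int)) hjs hd3 (by omega : 0 < k + 1) (by omega)
    have hd4 := drop_succ hd3
    have T5 := skip_ws (cfg := cfg) (n := n) (by omega) (k + 1) ((k + 1 - 1 : Nat) : Int) (some ts1) ((k + 1 : Nat) : Int) pre' _ _ hpre' hd4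
    have hd5 := drop_advance hd4
    -- the value, whitespace
    have hstop : StopAfter cfg (post ++ (tail.tail ++ 0x7d :: rest)) := by
      cases tail with
      | nil => exact stopAfter_post cfg hpost (primStop_rbrace cfg) rest
      | cons _ _ _ _ _ _ _ => exact stopAfter_post cfg hpost (primStop_comma cfg) _
    have hkk : ((k + 1 - 1 : Nat) : Int) = (k : Int) := by simp
    rw [hkk] at T4 T5
    obtain ⟨ts2, P2, T6⟩ := value_reaches val hval _ (k + 1) k ts1 _ hd5 (fun _ => hstop) (P1.len.trans hlen) (by omega) (by omega)
      (Or.inr ⟨k, rfl, by omega, by rw [h1k, stampTok_size]; simp, by rw [h1k, stampTok_size]; simp; omega⟩)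
      (Or.inr ⟨k, rfl, Or.inr ⟨by rw [h1k, stampTok_type], by rw [h1k, stampTok_size]⟩⟩)
    have hd6 := drop_advance hd5
    have T7 := skip_ws (cfg := cfg) (n := n) (by omega) (k + 1 + val.count) (supAfter cfg val ts1 (k + 1) k) (some ts2)
      ((k + 1 + val.count : Nat) : Int) post _ _ hpost hd6
    have hd7 := drop_advance hd6
    -- the token array after the member
    have hsupo : ∀ a : Nat, (o : Int) = a → a < k := fun a h => by omega
    have P := Placed.member P1 P2 hsupo
    have hclosed : AllClosed (⟨JSMN_STRING, (pos + pre.length + 1 : Nat), (pos + pre.length + 1 + key.length : Nat), 1, o⟩ ::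
        val.tokens (pos + pre.length + 1 + key.length + 1 + mid.length + 1 + pre'.length) (k + 1) k) :=
      AllClosed.cons (isOpen_nat_end ..) (Layout.tokens_closed val _ _ _)
    have hparents : ParentsOk (⟨JSMN_STRING, (pos + pre.length + 1 : Nat), (pos + pre.length + 1 + key.length : Nat), 1, o⟩ ::
        val.tokens (pos + pre.length + 1 + key.length + 1 + mid.length + 1 + pre'.length) (k + 1) k) k o := by
      have := ParentsOk.cons_append (t := ⟨JSMN_STRING, (pos + pre.length + 1 : Nat), (pos + pre.length + 1 + key.length : Nat), 1, o⟩)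
        (r := []) (par := o) rfl (Layout.tokens_parents val (pos + pre.length + 1 + key.length + 1 + mid.length + 1 + pre'.length) (k + 1) k)
        (ParentsOk.nil _ _)
      simpa using this
    have hin2 := hin.extend P hclosed hparents
    simp only [List.length_cons, Layout.tokens_length] at hin2
    rw [show k + (val.count + 1) = k + 1 + val.count by omega] at hin2
    have h2o : ts2.getD o default = { ts.getD o default with size := (ts.getD o default).size + 1 } := P.sup_eq o rfl
    have h2k : ts2.getD k default = stampTok cfg ⟨JSMN_STRING, (pos + pre.length + 1 : Nat), (pos + pre.length + 1 + key.length : Nat), 1, o⟩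
        (ts.getD k default) := by simpa using P.new_eq 0 (by simp)
    have Tm := (((((T1.trans T2).trans T3).trans T4).trans T5).trans T6).trans T7
    cases tail with
    | nil =>
      refine ⟨ts2, supAfter cfg val ts1 (k + 1) k, (P.append (Placed.nil cfg ts2 o _) hsupo).cast ?_ ?_, ?_⟩
      · simp [Members.length]
      · simp [Members.tokens]
      · exact Tm.cast (St.ext' (by simp [Members.text, Members.tail]; omega) (by simp [Members.count]; omega) rfl rfl
          (by simp [Members.count]; omega))
    | cons pre2 key2 mid2 pre2' val2 post2 tail2 =>
      have hd7' : js.drop (pos + pre.length + 1 + key.length + 1 + mid.length + 1 + pre'.length + val.text.length + post.length) =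
          0x2c :: ((Members.cons pre2 key2 mid2 pre2' val2 post2 tail2).text ++ 0x7d :: rest) := by simpa [Members.tail, Members.text] using hd7
      have hlt7 := lt_of_drop hd7'
      -- `,`: back to the object
      have T8 : Reaches cfg js n
          ⟨⟨pos + pre.length + 1 + key.length + 1 + mid.length + 1 + pre'.length + val.text.length + post.length, k + 1 + val.count,
            supAfter cfg val ts1 (k + 1) k⟩, some ts2, ((k + 1 + val.count : Nat) : Int)⟩
          ⟨⟨pos + pre.length + 1 + key.length + 1 + mid.length + 1 + pre'.length + val.text.length + post.length + 1, k + 1 + val.count, o⟩,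
            some ts2, ((k + 1 + val.count : Nat) : Int)⟩ := by
        have hin1 : Inside cfg ts1 o (k + 1) := by
          have := hin.extend P1 (AllClosed.cons (isOpen_nat_end ..) (fun _ h => by simp at h)) (fun j hj => Or.inl (by
            have : j = 0 := by simpa using hj
            subst this; rfl))
          simpa using this
        unfold supAfter
        split
        · simp only [openBelow, scanOpen_eq_some hin1.isOpen (k + 1) hin1.lt hin1.closed]
          exact comma_trip_container hjs hd7' (Or.inr (by rw [h2o]; exact hty))
        · exact comma_trip_key hjs hd7' (by rw [h2k, stampTok_type]) (fun hl => by rw [h2k, stampTok_parent_links hl]) hin2.lt (by omega)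
            hin2.isOpen (Or.inr (by rw [h2o]; exact hty)) hin2.closed
      have hvc := Layout.count_le_text val hval
      obtain ⟨ts3, sup', P3, T9⟩ := IH (pos + pre.length + 1 + key.length + 1 + mid.length + 1 + pre'.length + val.text.length + post.length + 1)
        (k + 1 + val.count) o ts2 rest (drop_succ hd7') (P.len.trans hlen) (by omega) (by omega) hin2 (by rw [h2o]; exact hty)
        (by rw [h2o]; simp only; omega) (by rw [h2o]; simp only; omega)
      refine ⟨ts3, sup', (P.append (by
        simp only [List.length_cons, Layout.tokens_length]
        rw [show k + (val.count + 1) = k + 1 + val.count by omega]; exact P3) hsupo).cast ?_ ?_, ?_⟩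
      · simp [Members.length]
      · simp [Members.tokens]
      · exact ((Tm.trans T8).trans T9).cast (St.ext' (by simp [Members.text, Members.tail]; omega) (by simp [Members.count]; omega) rfl rfl
          (by simp [Members.count]; omega))
end

end
end Jsmn
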